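-- pv_equiv track=rewrite | github.com/MikeKorsikov/PythonClasses | Lesson36n/HW36n/Class.py | set_maximum
-- ===== SOURCE A (Python) =====
-- def set_maximum(set_of_integers):
--     if isinstance(set_of_integers, set):
--         set_max = 0
--         for i in set_of_integers:
--             if isinstance(i, int):
--                 if i > set_max:
--                     set_max = i
--             else:
--                 return "Error: wrong input."
--         return set_max
--     return 'Error: input is not a set.'
-- ===== SOURCE B (Python) =====
-- def set_maximum(set_of_integers):
--     if not isinstance(set_of_integers, set):
--         return 'Error: input is not a set.'
--     if not all(isinstance(i, int) for i in set_of_integers):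
--         return "Error: wrong input."
--     return max([0, *set_of_integers])
-- ===== Notes on version B (the rewrite author's own statement) =====
-- stated objective: simpler
-- what changed: Replaced the single combined validate-and-track-max loop with a validation pass (all + isinstance) followed by the builtin max over [0, *set], keeping the 0 clamp.
import Mathlib
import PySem

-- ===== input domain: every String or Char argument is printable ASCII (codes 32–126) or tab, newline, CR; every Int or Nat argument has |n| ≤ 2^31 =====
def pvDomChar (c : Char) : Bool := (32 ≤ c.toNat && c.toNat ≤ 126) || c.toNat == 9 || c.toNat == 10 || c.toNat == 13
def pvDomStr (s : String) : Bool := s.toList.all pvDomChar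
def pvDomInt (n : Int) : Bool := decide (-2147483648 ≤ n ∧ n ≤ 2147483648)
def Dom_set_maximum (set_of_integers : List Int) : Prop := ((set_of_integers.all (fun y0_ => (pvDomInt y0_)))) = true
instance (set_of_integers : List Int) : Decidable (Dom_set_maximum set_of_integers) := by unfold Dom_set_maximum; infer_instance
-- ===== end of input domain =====

-- B replaces A's combined validate-and-track-max loop with a validation pass plus builtin max over 0::xs (simpler).
-- Under the type convention the input is a set of ints, so the isinstance branches of both Pythons always pass.

-- ===== PORT A =====
-- A: loop with accumulator set_max = 0, updated when i > set_max; the isinstance guards always succeed on List Int.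
def set_maximum (set_of_integers : List Int) : Int :=
  set_of_integers.foldl (fun set_max i => if i > set_max then i else set_max) 0

-- ===== PORT B =====
-- B: max([0, *set_of_integers]) = Python max over the nonempty list 0 :: xs.
def set_maximum_alt (set_of_integers : List Int) : Int :=
  ((0 : Int) :: set_of_integers).foldl max 0
-- note: Python's max folds binary max over the nonempty list; written as foldl max over 0::xs.

-- ===== PRECONDITION & SPEC =====
def Spec_set_maximum (set_of_integers : List Int) (out : Int) : Prop := out = set_maximum_alt set_of_integers
instance (set_of_integers : List Int) (out : Int) : Decidable (Spec_set_maximum set_of_integers out) := by unfold Spec_set_maximum; infer_instance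

-- ===== CLAIM (what is proved, stated in full; the proofs are below) =====
def Claim_equal_set_maximum : Prop := ∀ (set_of_integers : List Int), Dom_set_maximum set_of_integers → Spec_set_maximum set_of_integers (set_maximum set_of_integers)

-- ===== LEMMAS AND PROOFS =====
theorem pv_fold_eq (xs : List Int) (a : Int) :
    xs.foldl (fun set_max i => if i > set_max then i else set_max) a = xs.foldl max a := by
  induction xs generalizing a with
  | nil => rfl
  | cons x xs ih =>
      simp only [List.foldl]
      rw [ih]
      congr 1
      by_cases h : x > a <;> simp [max_def] <;> omega

-- ===== VERDICT (by name: the statement is the Claim_ definition above) =====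
theorem set_maximum_spec : Claim_equal_set_maximum := by
  intro xs _
  unfold Spec_set_maximum set_maximum set_maximum_alt
  simp [pv_fold_eq]
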